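-- pv_equiv track=rewrite | github.com/OthmanMohammad/multi-agent-support-system | src/agents/revenue/monetization/usage_billing/overage_alert.py | _determine_alert_priority
-- ===== SOURCE A (Python) =====
-- def _determine_alert_priority(alerts: list[dict]) -> str:
--     """Determine overall alert priority"""
--     if not alerts:
--         return "none"
--
--     priorities = [a["priority"] for a in alerts]
--
--     if "critical" in priorities:
--         return "critical"
--     elif "high" in priorities:
--         return "high"
--     elif "medium" in priorities:
--         return "medium"
--     else:
--         return "low"
-- ===== SOURCE B (Python) =====
-- def _determine_alert_priority(alerts: list[dict]) -> str:
--     """Determine overall alert priority"""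
--     if not alerts:
--         return "none"
--     rank = {"critical": 3, "high": 2, "medium": 1}
--     best = 0
--     for a in alerts:
--         best = max(best, rank.get(a["priority"], 0))
--     return {3: "critical", 2: "high", 1: "medium", 0: "low"}[best]
-- ===== Notes on version B (the rewrite author's own statement) =====
-- stated objective: idiomatic
-- what changed: Replaces the ordered cascade of list-membership tests over a materialised priorities list with a single max-fold over a numeric rank table, decoded back to a string at the end.
import Mathlib
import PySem

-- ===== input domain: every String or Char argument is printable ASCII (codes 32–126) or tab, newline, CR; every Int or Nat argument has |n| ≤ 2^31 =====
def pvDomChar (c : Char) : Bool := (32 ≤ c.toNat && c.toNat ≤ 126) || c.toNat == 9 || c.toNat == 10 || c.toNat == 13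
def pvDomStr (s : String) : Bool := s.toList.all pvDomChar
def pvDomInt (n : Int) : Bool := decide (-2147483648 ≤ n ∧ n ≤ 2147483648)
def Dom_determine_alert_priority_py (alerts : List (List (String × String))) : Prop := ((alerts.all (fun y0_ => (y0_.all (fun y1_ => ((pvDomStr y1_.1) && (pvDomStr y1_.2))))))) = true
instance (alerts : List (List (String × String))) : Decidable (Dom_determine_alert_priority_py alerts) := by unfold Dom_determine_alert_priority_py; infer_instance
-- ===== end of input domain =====

-- B replaces A's cascade of membership tests with a single max-fold over a numeric rank table (idiomatic; same cost).

-- ===== PORT A =====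
-- a["priority"]: first match in the association list; default "" is never reached under Pre_ (missing key = KeyError, excluded by Pre_)
def determine_alert_priority_py (alerts : List (List (String × String))) : String :=
  if alerts = [] then "none"
  else
    let priorities := alerts.map (fun a => (PySem.Dict.get? ⟨a⟩ "priority").getD "")
    if priorities.contains "critical" then "critical"
    else if priorities.contains "high" then "high"
    else if priorities.contains "medium" then "medium"
    else "low"

-- ===== PORT B =====
-- rank.get(p, 0)
def pvRank (p : String) : Nat :=
  if p = "critical" then 3 else if p = "high" then 2 else if p = "medium" then 1 else 0

-- {3:"critical",2:"high",1:"medium",0:"low"}[best]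
def pvDecode (n : Nat) : String :=
  if n = 3 then "critical" else if n = 2 then "high" else if n = 1 then "medium" else "low"

def determine_alert_priority_py_alt (alerts : List (List (String × String))) : String :=
  if alerts = [] then "none"
  else
    let best := alerts.foldl (fun m a => max m (pvRank ((PySem.Dict.get? ⟨a⟩ "priority").getD ""))) 0
    pvDecode best

-- ===== PRECONDITION & SPEC =====
-- Pre_ excludes exactly the inputs where A raises KeyError: an alert dict without a "priority" key (B raises there too).
def Pre_determine_alert_priority_py (alerts : List (List (String × String))) : Prop :=
  ∀ a ∈ alerts, (PySem.Dict.get? ⟨a⟩ "priority").isSome = true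
instance (alerts : List (List (String × String))) : Decidable (Pre_determine_alert_priority_py alerts) := by unfold Pre_determine_alert_priority_py; infer_instance
def pvWitness_determine_alert_priority_py : (List (List (String × String))) :=
  [[("priority", "high")], [("priority", "weird"), ("msg", "x")]]

def Spec_determine_alert_priority_py (alerts : List (List (String × String))) (out : String) : Prop := out = determine_alert_priority_py_alt alerts
instance (alerts : List (List (String × String))) (out : String) : Decidable (Spec_determine_alert_priority_py alerts out) := by unfold Spec_determine_alert_priority_py; infer_instance

-- ===== CLAIM (what is proved, stated in full; the proofs are below) =====
def Claim_equal_determine_alert_priority_py : Prop := ∀ (alerts : List (List (String × String))), Dom_determine_alert_priority_py alerts → Pre_determine_alert_priority_py alerts → Spec_determine_alert_priority_py alerts (determine_alert_priority_py alerts)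

-- ===== LEMMAS AND PROOFS =====

-- maximum rank of a list of priority strings (spec-side recursion used only in the proofs)
def pvMaxRank : List String → Nat
  | [] => 0
  | p :: t => max (pvRank p) (pvMaxRank t)

theorem foldl_max_rank (l : List String) (n : Nat) :
    l.foldl (fun m p => max m (pvRank p)) n = max n (pvMaxRank l) := by
  induction l generalizing n with
  | nil => simp [pvMaxRank]
  | cons p t ih => simp [List.foldl, pvMaxRank, ih, Nat.max_assoc]

theorem pvMaxRank_le (l : List String) : pvMaxRank l ≤ 3 := by
  induction l with
  | nil => simp [pvMaxRank]
  | cons p t ih =>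
    simp only [pvMaxRank, Nat.max_le]
    refine ⟨?_, ih⟩
    unfold pvRank; split_ifs <;> omega

theorem mem_of_rank (l : List String) (s : String) (k : Nat)
    (hk : ∀ p, pvRank p = k ↔ p = s) :
    s ∈ l ↔ ∃ p ∈ l, pvRank p = k := by
  constructor
  · intro h; exact ⟨s, h, (hk s).mpr rfl⟩
  · rintro ⟨p, hp, hr⟩; rwa [(hk p).mp hr] at hp

theorem le_maxRank_iff (l : List String) (k : Nat) :
    k ≤ pvMaxRank l ∧ 0 < k ↔ (∃ p ∈ l, k ≤ pvRank p) ∧ 0 < k := by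
  induction l with
  | nil => simp [pvMaxRank]
  | cons p t ih =>
    constructor
    · rintro ⟨h, hk⟩
      rcases le_max_iff.mp (by simpa [pvMaxRank] using h) with h' | h'
      · exact ⟨⟨p, by simp, h'⟩, hk⟩
      · obtain ⟨⟨q, hq, hq2⟩, _⟩ := ih.mp ⟨h', hk⟩
        exact ⟨⟨q, by simp [hq], hq2⟩, hk⟩
    · rintro ⟨⟨q, hq, hq2⟩, hk⟩
      refine ⟨?_, hk⟩
      rcases List.mem_cons.mp hq with rfl | hq'
      · simp [pvMaxRank, hq2]
      · have := (ih.mpr ⟨⟨q, hq', hq2⟩, hk⟩).1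
        simp [pvMaxRank]; omega

theorem rank_three (p : String) : pvRank p = 3 ↔ p = "critical" := by
  unfold pvRank; split_ifs with h1 h2 h3 <;> simp_all
theorem rank_two (p : String) : pvRank p = 2 ↔ p = "high" := by
  unfold pvRank; split_ifs with h1 h2 h3 <;> simp_all
theorem rank_one (p : String) : pvRank p = 1 ↔ p = "medium" := by
  unfold pvRank; split_ifs with h1 h2 h3 <;> simp_all

theorem rank_cases (p : String) : pvRank p ≤ 3 := by
  unfold pvRank; split_ifs <;> omega

theorem maxRank_ge (l : List String) (p : String) (hp : p ∈ l) (k : Nat) (hk : 0 < k)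
    (h : k ≤ pvRank p) : k ≤ pvMaxRank l :=
  ((le_maxRank_iff l k).mpr ⟨⟨p, hp, h⟩, hk⟩).1

theorem cascade_eq_decode (l : List String) :
    (if l.contains "critical" then "critical"
     else if l.contains "high" then "high"
     else if l.contains "medium" then "medium"
     else "low") = pvDecode (pvMaxRank l) := by
  have hle := pvMaxRank_le l
  have h3 := mem_of_rank l "critical" 3 rank_three
  have h2 := mem_of_rank l "high" 2 rank_two
  have h1 := mem_of_rank l "medium" 1 rank_one
  simp only [List.contains_iff_mem]
  by_cases c3 : "critical" ∈ l
  · obtain ⟨p, hp, hr⟩ := h3.mp c3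
    have hm : pvMaxRank l = 3 :=
      le_antisymm hle (maxRank_ge l p hp 3 (by omega) (by omega))
    simp [c3, hm, pvDecode]
  · have n3 : pvMaxRank l ≠ 3 := by
      intro h
      obtain ⟨⟨p, hp, hr⟩, -⟩ := (le_maxRank_iff l 3).mp ⟨by omega, by omega⟩
      have : pvRank p = 3 := by have := rank_cases p; omega
      exact c3 (h3.mpr ⟨p, hp, this⟩)
    by_cases c2 : "high" ∈ l
    · obtain ⟨p, hp, hr⟩ := h2.mp c2
      have h2le : 2 ≤ pvMaxRank l := maxRank_ge l p hp 2 (by omega) (by omega)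
      have hm : pvMaxRank l = 2 := by omega
      simp [c3, c2, hm, pvDecode]
    · have n2 : pvMaxRank l ≠ 2 := by
        intro h
        obtain ⟨⟨p, hp, hr⟩, -⟩ := (le_maxRank_iff l 2).mp ⟨by omega, by omega⟩
        have := rank_cases p
        rcases (by omega : pvRank p = 2 ∨ pvRank p = 3) with h' | h'
        · exact c2 (h2.mpr ⟨p, hp, h'⟩)
        · exact n3 (by have := maxRank_ge l p hp 3 (by omega) (by omega); omega)
      by_cases c1 : "medium" ∈ l
      · obtain ⟨p, hp, hr⟩ := h1.mp c1
        have h1le : 1 ≤ pvMaxRank l := maxRank_ge l p hp 1 (by omega) (by omega)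
        have hm : pvMaxRank l = 1 := by omega
        simp [c3, c2, c1, hm, pvDecode]
      · have n1 : pvMaxRank l ≠ 1 := by
          intro h
          obtain ⟨⟨p, hp, hr⟩, -⟩ := (le_maxRank_iff l 1).mp ⟨by omega, by omega⟩
          have := rank_cases p
          rcases (by omega : pvRank p = 1 ∨ pvRank p = 2 ∨ pvRank p = 3) with h' | h' | h'
          · exact c1 (h1.mpr ⟨p, hp, h'⟩)
          · exact n2 (by have := maxRank_ge l p hp 2 (by omega) (by omega); omega)
          · exact n3 (by have := maxRank_ge l p hp 3 (by omega) (by omega); omega)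
        have hm : pvMaxRank l = 0 := by omega
        simp [c3, c2, c1, hm, pvDecode]

-- ===== VERDICT (by name: the statement is the Claim_ definition above) =====
theorem determine_alert_priority_py_spec : Claim_equal_determine_alert_priority_py := by
  intro alerts _ _
  unfold Spec_determine_alert_priority_py determine_alert_priority_py determine_alert_priority_py_alt
  by_cases h : alerts = []
  · simp [h]
  · simp only [h, if_false]
    rw [← List.foldl_map (f := fun a : List (String × String) => (PySem.Dict.get? ⟨a⟩ "priority").getD "")
        (g := fun m p => max m (pvRank p)),
       foldl_max_rank, Nat.zero_max, cascade_eq_decode]
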